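-- pv_equiv track=rewrite | github.com/edi-riga/handwash | dataset-metc/separate-frames.py | select_frames_to_save
-- ===== SOURCE A (Python) =====
-- def select_frames_to_save(is_washing, codes):
--     old_code = -1
--     old_saved = False
--     num_snippets = 0
--     mapping = {}
--     current_snippet = {}
--     for i in range(len(is_washing)):
--         new_code = codes[i]
--         new_saved = (is_washing[i] == 2 and new_code != -1)
--         if new_saved != old_saved:
--             if new_saved:
--                 num_snippets += 1
--                 current_snippet = {}
--             else:
--                 # save current snippet
--                 for key in current_snippet:
--                     mapping[key] = current_snippet[key]
--
--         if new_saved: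
--             current_snippet_frame = len(current_snippet)
--             current_snippet[i] = (current_snippet_frame, num_snippets, new_code)
--         old_saved = new_saved
--         old_code = new_code
--
--     if old_saved:
--         # save current snippet
--         for key in current_snippet:
--             mapping[key] = current_snippet[key]
--
--     return mapping
-- ===== SOURCE B (Python) =====
-- def select_frames_to_save(is_washing, codes):
--     n = len(is_washing)
--     mapping = {}
--     num_snippets = 0
--     i = 0
--     while i < n:
--         if is_washing[i] == 2 and codes[i] != -1:
--             num_snippets += 1
--             start = i
--             while i < n and is_washing[i] == 2 and codes[i] != -1:
--                 mapping[i] = (i - start, num_snippets, codes[i])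
--                 i += 1
--         else:
--             i += 1
--     return mapping
-- ===== Notes on version B (the rewrite author's own statement) =====
-- stated objective: simpler
-- what changed: B replaces A's flag-based transition scan (old_saved flag, a current_snippet buffer dict flushed into mapping on each True-to-False transition and at the end) by a run-at-a-time nested loop: the outer loop finds the start of each saved run, the inner loop writes that whole run directly into mapping with position i - start, so the flag, the buffer and both copy loops disappear.
import Mathlib
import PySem

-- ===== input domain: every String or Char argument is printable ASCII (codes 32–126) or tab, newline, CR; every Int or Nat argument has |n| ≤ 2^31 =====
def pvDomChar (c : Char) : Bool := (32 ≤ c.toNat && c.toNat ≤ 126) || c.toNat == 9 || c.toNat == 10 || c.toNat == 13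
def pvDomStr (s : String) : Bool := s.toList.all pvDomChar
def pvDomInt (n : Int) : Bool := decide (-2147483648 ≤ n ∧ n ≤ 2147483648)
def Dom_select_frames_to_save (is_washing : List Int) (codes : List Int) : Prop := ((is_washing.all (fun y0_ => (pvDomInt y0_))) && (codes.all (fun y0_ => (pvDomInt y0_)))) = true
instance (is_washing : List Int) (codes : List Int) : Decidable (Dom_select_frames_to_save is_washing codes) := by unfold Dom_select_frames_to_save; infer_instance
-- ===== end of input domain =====

-- B replaces A's transition-flag scan with its buffer-and-flush dict copies by a run-at-a-time
-- nested loop writing mapping directly with position i - start; objective: simpler, same O(n) cost.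

-- ===== PORT A =====
-- 'for key in current_snippet: mapping[key] = current_snippet[key]'  (the default of getD is never used: key ∈ cur)
def stfsFlush (mapping cur : PySem.Dict Int (Int × Int × Int)) : PySem.Dict Int (Int × Int × Int) :=
  cur.keys.foldl (fun m k => m.insert k (cur.getD k (0, 0, 0))) mapping

-- one iteration of A's loop body (old_code is the first component, assigned but never read)
def stepA (is_washing codes : List Int) (st : Int × Bool × Int × PySem.Dict Int (Int × Int × Int) × PySem.Dict Int (Int × Int × Int)) (i : Int) :
    Int × Bool × Int × PySem.Dict Int (Int × Int × Int) × PySem.Dict Int (Int × Int × Int) :=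
  match st with
  | (_, old_saved, num_snippets, mapping, cur) =>
    let new_code := PySem.List.pyGetD codes i 0      -- codes[i]; exact under Pre_ (0 ≤ i < len codes)
    let new_saved := (PySem.List.pyGetD is_washing i 0 == 2) && (new_code != -1)   -- is_washing[i]; i in range
    let (num_snippets, mapping, cur) :=
      if new_saved != old_saved then
        if new_saved then (num_snippets + 1, mapping, (PySem.Dict.empty : PySem.Dict Int (Int × Int × Int)))
        else (num_snippets, stfsFlush mapping cur, cur)
      else (num_snippets, mapping, cur)
    let cur := if new_saved then cur.insert i ((cur.size : Int), num_snippets, new_code) else cur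
    (new_code, new_saved, num_snippets, mapping, cur)

def select_frames_to_save (is_washing : List Int) (codes : List Int) : List (Int × Int × Int × Int) :=
  let st := (PySem.List.pyRange 0 (is_washing.length : Int)).foldl (stepA is_washing codes)
      (-1, false, 0, PySem.Dict.empty, PySem.Dict.empty)
  (if st.2.1 then stfsFlush st.2.2.2.1 st.2.2.2.2 else st.2.2.2.1).items

-- ===== PORT B =====
-- B walks the frames as the enumerated list (index, washing); i only moves forward one frame at
-- a time, so B's two index-based while loops become recursion over the remaining enumerated suffix.
-- inner while (runB): consume the current run of saved frames, writing each directly into mapping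
def runB (codes : List Int) : List (Int × Int) → Int → Int → PySem.Dict Int (Int × Int × Int) →
    List (Int × Int) × PySem.Dict Int (Int × Int × Int)
  | [], _, _, mapping => ([], mapping)
  | (i, w) :: rest, start, num, mapping =>
    if (w == 2) && (PySem.List.pyGetD codes i 0 != -1) then   -- codes[i]; exact under Pre_
      runB codes rest start num (mapping.insert i (i - start, num, PySem.List.pyGetD codes i 0))
    else ((i, w) :: rest, mapping)

-- termination helper for goB: the inner while never lengthens the remaining suffix
lemma runB_length_le (codes : List Int) : ∀ (xs : List (Int × Int)) (start num : Int)
    (m : PySem.Dict Int (Int × Int × Int)), (runB codes xs start num m).1.length ≤ xs.length := by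
  intro xs
  induction xs with
  | nil => intro start num m; simp [runB]
  | cons p rest ih =>
    intro start num m
    obtain ⟨i, w⟩ := p
    simp only [runB]
    split
    · exact le_trans (ih start num _) (by simp)
    · simp

-- outer while (goB)
def goB (codes : List Int) : List (Int × Int) → Int → PySem.Dict Int (Int × Int × Int) →
    PySem.Dict Int (Int × Int × Int)
  | [], _, mapping => mapping
  | (i, w) :: rest, num, mapping =>
    if h : ((w == 2) && (PySem.List.pyGetD codes i 0 != -1)) = true then
      let r := runB codes ((i, w) :: rest) i (num + 1) mapping
      goB codes r.1 (num + 1) r.2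
    else goB codes rest num mapping
termination_by xs => xs.length
decreasing_by
  · simp only [runB, h, if_pos]
    exact Nat.lt_succ_of_le (runB_length_le codes rest i (num + 1) _)
  · simp

def select_frames_to_save_alt (is_washing : List Int) (codes : List Int) : List (Int × Int × Int × Int) :=
  (goB codes (PySem.List.enumerate is_washing 0) 0 PySem.Dict.empty).items

-- ===== PRECONDITION & SPEC =====
-- Pre_ excludes exactly the inputs where Python A raises IndexError: codes shorter than is_washing.
def Pre_select_frames_to_save (is_washing : List Int) (codes : List Int) : Prop :=
  is_washing.length ≤ codes.length
instance (is_washing : List Int) (codes : List Int) : Decidable (Pre_select_frames_to_save is_washing codes) := by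
  unfold Pre_select_frames_to_save; infer_instance
def pvWitness_select_frames_to_save : List Int × List Int := ([2, 2, 0, 2], [5, 5, 1, -1])
def Spec_select_frames_to_save (is_washing : List Int) (codes : List Int) (out : List (Int × Int × Int × Int)) : Prop := out = select_frames_to_save_alt is_washing codes
instance (is_washing : List Int) (codes : List Int) (out : List (Int × Int × Int × Int)) : Decidable (Spec_select_frames_to_save is_washing codes out) := by unfold Spec_select_frames_to_save; infer_instance

-- ===== CLAIM (what is proved, stated in full; the proofs are below) =====
def Claim_equal_select_frames_to_save : Prop := ∀ (is_washing : List Int) (codes : List Int), Dom_select_frames_to_save is_washing codes → Pre_select_frames_to_save is_washing codes → Spec_select_frames_to_save is_washing codes (select_frames_to_save is_washing codes)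

-- ===== LEMMAS AND PROOFS =====
-- proof-side intermediate: a direct single pass (prev flag, snippet counter, frame-in-snippet counter)
def stepD (codes : List Int) (st : Bool × Int × Int × PySem.Dict Int (Int × Int × Int)) (p : Int × Int) :
    Bool × Int × Int × PySem.Dict Int (Int × Int × Int) :=
  match st, p with
  | (prev_saved, num_snippets, frame_in_snippet, mapping), (i, w) =>
    let c := PySem.List.pyGetD codes i 0
    let saved := (w == 2) && (c != -1)
    let (num_snippets, frame_in_snippet) :=
      if saved && !prev_saved then (num_snippets + 1, (0 : Int)) else (num_snippets, frame_in_snippet)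
    let (mapping, frame_in_snippet) :=
      if saved then (mapping.insert i (frame_in_snippet, num_snippets, c), frame_in_snippet + 1)
      else (mapping, frame_in_snippet)
    (saved, num_snippets, frame_in_snippet, mapping)

-- A's loop body with is_washing[i] passed in as w (proof-side view of stepA)
def stepAW (codes : List Int) (st : Int × Bool × Int × PySem.Dict Int (Int × Int × Int) × PySem.Dict Int (Int × Int × Int)) (p : Int × Int) :
    Int × Bool × Int × PySem.Dict Int (Int × Int × Int) × PySem.Dict Int (Int × Int × Int) :=
  match st with
  | (_, old_saved, num_snippets, mapping, cur) =>
    let new_code := PySem.List.pyGetD codes p.1 0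
    let new_saved := (p.2 == 2) && (new_code != -1)
    let (num_snippets, mapping, cur) :=
      if new_saved != old_saved then
        if new_saved then (num_snippets + 1, mapping, (PySem.Dict.empty : PySem.Dict Int (Int × Int × Int)))
        else (num_snippets, stfsFlush mapping cur, cur)
      else (num_snippets, mapping, cur)
    let cur := if new_saved then cur.insert p.1 ((cur.size : Int), num_snippets, new_code) else cur
    (new_code, new_saved, num_snippets, mapping, cur)

lemma stepA_eq_stepAW (is_washing codes : List Int) (st : Int × Bool × Int × PySem.Dict Int (Int × Int × Int) × PySem.Dict Int (Int × Int × Int)) (i : Int) :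
    stepA is_washing codes st i = stepAW codes st (i, PySem.List.pyGetD is_washing i 0) := rfl

lemma enumerate_append_singleton {α : Type} (xs : List α) (x : α) : ∀ (s : Int),
    PySem.List.enumerate (xs ++ [x]) s = PySem.List.enumerate xs s ++ [(s + xs.length, x)] := by
  induction xs with
  | nil => intro s; simp [PySem.List.enumerate_cons, PySem.List.enumerate_nil]
  | cons y ys ih => intro s; simp [PySem.List.enumerate_cons, ih]; ring

lemma pyGetD_append_lt (xs : List Int) (x i d : Int) (h0 : 0 ≤ i) (h : i < xs.length) :
    PySem.List.pyGetD (xs ++ [x]) i d = PySem.List.pyGetD xs i d := by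
  rw [PySem.List.pyGetD_eq_getElem (xs ++ [x]) d h0 (by simp; omega),
      PySem.List.pyGetD_eq_getElem xs d h0 (by omega)]
  rw [List.getElem_append_left (by omega)]

-- 'for i in range(len(xs)): … xs[i] …' as a fold over enumerate(xs)
lemma foldl_idx_eq_enumerate {σ : Type} (f : σ → Int × Int → σ) (d : Int) (xs : List Int) (init : σ) :
    (PySem.List.pyRange 0 (xs.length : Int)).foldl (fun acc i => f acc (i, PySem.List.pyGetD xs i d)) init
    = (PySem.List.enumerate xs 0).foldl f init := by
  induction xs using List.reverseRecOn generalizing init with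
  | nil => simp [PySem.List.enumerate_nil]
  | append_singleton ys y ih =>
    have hlen : ((ys ++ [y]).length : Int) = (ys.length : Int) + 1 := by simp
    rw [hlen, PySem.List.pyRange_one_succ_right (by positivity), List.foldl_append,
        enumerate_append_singleton, List.foldl_append]
    have hcongr : (PySem.List.pyRange 0 (ys.length : Int)).foldl
        (fun acc i => f acc (i, PySem.List.pyGetD (ys ++ [y]) i d)) init
        = (PySem.List.pyRange 0 (ys.length : Int)).foldl
        (fun acc i => f acc (i, PySem.List.pyGetD ys i d)) init := by
      apply PySem.List.foldl_congr_mem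
      intro acc x hx
      rw [PySem.List.mem_pyRange_one] at hx
      rw [pyGetD_append_lt ys y x d hx.1 hx.2]
    rw [hcongr, ih]
    simp [List.foldl]

lemma stfsFlush_items (m cur : PySem.Dict Int (Int × Int × Int))
    (hnd : cur.keys.Nodup) (hdisj : ∀ k ∈ cur.keys, m.contains k = false) :
    (stfsFlush m cur).items = m.items ++ cur.items := by
  unfold stfsFlush
  rw [PySem.Dict.items_foldl_insert_fresh cur.keys (fun k => k) (fun k => cur.getD k (0, 0, 0)) m
      hdisj (by simpa using hnd)]
  rw [← PySem.Dict.items_eq_map_keys cur hnd (0, 0, 0)]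

lemma keys_eq_items_map_fst (d : PySem.Dict Int (Int × Int × Int)) : d.keys = d.items.map Prod.fst := by
  simp only [PySem.Dict.keys]

lemma contains_false_of_keys_lt (d : PySem.Dict Int (Int × Int × Int)) (s : Int)
    (h : ∀ k ∈ d.items.map Prod.fst, k < s) : d.contains s = false := by
  rw [PySem.Dict.contains_eq_decide_mem_keys, keys_eq_items_map_fst, decide_eq_false_iff_not]
  intro hm
  exact absurd (h s hm) (lt_irrefl s)

lemma flush_items_of_nodup (m cur : PySem.Dict Int (Int × Int × Int))
    (h4 : ((m.items ++ cur.items).map Prod.fst).Nodup) :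
    (stfsFlush m cur).items = m.items ++ cur.items := by
  rw [List.map_append] at h4
  rcases List.nodup_append.mp h4 with ⟨_, hc, hdisj⟩
  apply stfsFlush_items
  · rw [keys_eq_items_map_fst]; exact hc
  · intro k hk
    rw [keys_eq_items_map_fst] at hk
    rw [PySem.Dict.contains_eq_decide_mem_keys, keys_eq_items_map_fst, decide_eq_false_iff_not]
    intro hm'
    exact hdisj k hm' k hk rfl

lemma items_insert_fresh (d : PySem.Dict Int (Int × Int × Int)) (s : Int) (v : Int × Int × Int)
    (h : ∀ k ∈ d.items.map Prod.fst, k < s) :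
    (d.insert s v).items = d.items ++ [(s, v)] :=
  PySem.Dict.items_insert_of_not_contains d v (contains_false_of_keys_lt d s h)

lemma size_insert_fresh (d : PySem.Dict Int (Int × Int × Int)) (s : Int) (v : Int × Int × Int)
    (h : ∀ k ∈ d.items.map Prod.fst, k < s) :
    (d.insert s v).size = d.size + 1 := by
  rw [PySem.Dict.size_insert, if_neg]
  rw [contains_false_of_keys_lt d s h]
  simp

-- main loop invariant, part 1: A's (mapping, current_snippet) pair matches the direct pass's mapping
lemma loop_eq (codes : List Int) : ∀ (xs : List Int) (s oc : Int) (os : Bool) (ns : Int)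
    (mA cur : PySem.Dict Int (Int × Int × Int)) (fis : Int) (mB : PySem.Dict Int (Int × Int × Int)),
    (os = true → mB.items = mA.items ++ cur.items ∧ fis = (cur.size : Int)
       ∧ (∀ k ∈ (mA.items ++ cur.items).map Prod.fst, k < s) ∧ ((mA.items ++ cur.items).map Prod.fst).Nodup) →
    (os = false → mB.items = mA.items ∧ (∀ k ∈ mA.items.map Prod.fst, k < s) ∧ (mA.items.map Prod.fst).Nodup) →
    (let stA := (PySem.List.enumerate xs s).foldl (stepAW codes) (oc, os, ns, mA, cur);
     (if stA.2.1 then stfsFlush stA.2.2.2.1 stA.2.2.2.2 else stA.2.2.2.1).items)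
    = ((PySem.List.enumerate xs s).foldl (stepD codes) (os, ns, fis, mB)).2.2.2.items := by
  intro xs
  induction xs with
  | nil =>
    intro s oc os ns mA cur fis mB ht hf
    cases os with
    | false => simpa [PySem.List.enumerate_nil] using (hf rfl).1.symm
    | true =>
      obtain ⟨h1, -, -, h4⟩ := ht rfl
      simp only [PySem.List.enumerate_nil, List.foldl_nil, if_true]
      rw [flush_items_of_nodup mA cur h4, h1]
  | cons w rest ih =>
    intro s oc os ns mA cur fis mB ht hf
    simp only [PySem.List.enumerate_cons, List.foldl_cons]
    cases os with
    | true =>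
      obtain ⟨h1, h2, h3, h4⟩ := ht rfl
      have h3A : ∀ k ∈ mA.items.map Prod.fst, k < s := by
        intro k hk; exact h3 k (by rw [List.map_append]; exact List.mem_append_left _ hk)
      have h3C : ∀ k ∈ cur.items.map Prod.fst, k < s := by
        intro k hk; exact h3 k (by rw [List.map_append]; exact List.mem_append_right _ hk)
      have h3B : ∀ k ∈ mB.items.map Prod.fst, k < s := by rw [h1]; exact h3
      cases hb : ((w == 2) && (PySem.List.pyGetD codes s 0 != -1)) with
      | true =>
        have hsA : stepAW codes (oc, true, ns, mA, cur) (s, w)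
            = (PySem.List.pyGetD codes s 0, true, ns, mA,
               cur.insert s ((cur.size : Int), ns, PySem.List.pyGetD codes s 0)) := by
          simp [stepAW, hb]
        have hsB : stepD codes (true, ns, fis, mB) (s, w)
            = (true, ns, fis + 1, mB.insert s (fis, ns, PySem.List.pyGetD codes s 0)) := by
          simp [stepD, hb]
        rw [hsA, hsB]
        apply ih (s + 1)
        · intro _
          refine ⟨?_, ?_, ?_, ?_⟩
          · rw [items_insert_fresh mB s _ h3B, items_insert_fresh cur s _ h3C, h1, h2,
                List.append_assoc]
          · rw [size_insert_fresh cur s _ h3C, h2]; push_cast; ring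
          · intro k hk
            rw [items_insert_fresh cur s _ h3C, ← List.append_assoc, List.map_append,
                List.mem_append] at hk
            rcases hk with hk | hk
            · exact lt_trans (h3 k hk) (by omega)
            · simp at hk; omega
          · rw [items_insert_fresh cur s _ h3C, ← List.append_assoc, List.map_append]
            simp only [List.map_cons, List.map_nil]
            rw [List.nodup_append]
            refine ⟨h4, List.nodup_singleton _, ?_⟩
            intro a ha b hb
            simp only [List.mem_singleton] at hb
            subst hb
            intro h
            subst h
            exact absurd (h3 _ ha) (lt_irrefl _)
        · intro h; exact absurd h (by simp)
      | false =>
        have hsA : stepAW codes (oc, true, ns, mA, cur) (s, w)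
            = (PySem.List.pyGetD codes s 0, false, ns, stfsFlush mA cur, cur) := by
          simp [stepAW, hb]
        have hsB : stepD codes (true, ns, fis, mB) (s, w) = (false, ns, fis, mB) := by
          simp [stepD, hb]
        rw [hsA, hsB]
        apply ih (s + 1)
        · intro h; exact absurd h (by simp)
        · intro _
          refine ⟨?_, ?_, ?_⟩
          · rw [flush_items_of_nodup mA cur h4, h1]
          · intro k hk
            rw [flush_items_of_nodup mA cur h4] at hk
            exact lt_trans (h3 k hk) (by omega)
          · rw [flush_items_of_nodup mA cur h4]; exact h4
    | false =>
      obtain ⟨h1, h3, h4⟩ := hf rfl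
      have h3B : ∀ k ∈ mB.items.map Prod.fst, k < s := by rw [h1]; exact h3
      cases hb : ((w == 2) && (PySem.List.pyGetD codes s 0 != -1)) with
      | true =>
        have hsA : stepAW codes (oc, false, ns, mA, cur) (s, w)
            = (PySem.List.pyGetD codes s 0, true, ns + 1, mA,
               (PySem.Dict.empty : PySem.Dict Int (Int × Int × Int)).insert s
                 (0, ns + 1, PySem.List.pyGetD codes s 0)) := by
          simp [stepAW, hb, PySem.Dict.empty]
        have hsB : stepD codes (false, ns, fis, mB) (s, w)
            = (true, ns + 1, 1, mB.insert s (0, ns + 1, PySem.List.pyGetD codes s 0)) := by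
          simp [stepD, hb]
        rw [hsA, hsB]
        apply ih (s + 1)
        · intro _
          have hemp : ((PySem.Dict.empty : PySem.Dict Int (Int × Int × Int)).insert s
              (0, ns + 1, PySem.List.pyGetD codes s 0)).items
              = [(s, (0, ns + 1, PySem.List.pyGetD codes s 0))] := by
            rw [items_insert_fresh _ s _ (by simp [PySem.Dict.empty])]
            simp [PySem.Dict.empty]
          refine ⟨?_, ?_, ?_, ?_⟩
          · rw [items_insert_fresh mB s _ h3B, h1, hemp]
          · rw [size_insert_fresh _ s _ (by simp [PySem.Dict.empty])]
            simp [PySem.Dict.empty]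
          · intro k hk
            rw [hemp, List.map_append, List.mem_append] at hk
            rcases hk with hk | hk
            · exact lt_trans (h3 k hk) (by omega)
            · simp at hk; omega
          · rw [hemp, List.map_append]
            simp only [List.map_cons, List.map_nil]
            rw [List.nodup_append]
            refine ⟨h4, List.nodup_singleton _, ?_⟩
            intro a ha b hb
            simp only [List.mem_singleton] at hb
            subst hb
            intro h
            subst h
            exact absurd (h3 _ ha) (lt_irrefl _)
        · intro h; exact absurd h (by simp)
      | false =>
        have hsA : stepAW codes (oc, false, ns, mA, cur) (s, w)
            = (PySem.List.pyGetD codes s 0, false, ns, mA, cur) := by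
          simp [stepAW, hb]
        have hsB : stepD codes (false, ns, fis, mB) (s, w) = (false, ns, fis, mB) := by
          simp [stepD, hb]
        rw [hsA, hsB]
        apply ih (s + 1)
        · intro h; exact absurd h (by simp)
        · intro _
          exact ⟨h1, fun k hk => lt_trans (h3 k hk) (by omega), h4⟩

-- main loop invariant, part 2: the direct pass's final dict equals B's run-at-a-time dict,
-- literally (same inserts in the same order): false-state ↔ outer loop, true-state ↔ inner loop
lemma stepD_eq_goB (codes : List Int) : ∀ (xs : List Int) (s num fis : Int)
    (m : PySem.Dict Int (Int × Int × Int)),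
    (((PySem.List.enumerate xs s).foldl (stepD codes) (false, num, fis, m)).2.2.2
       = goB codes (PySem.List.enumerate xs s) num m)
    ∧ (∀ start : Int,
        ((PySem.List.enumerate xs s).foldl (stepD codes) (true, num, s - start, m)).2.2.2
          = (let r := runB codes (PySem.List.enumerate xs s) start num m;
             goB codes r.1 num r.2)) := by
  intro xs
  induction xs with
  | nil =>
    intro s num fis m
    constructor
    · simp [PySem.List.enumerate_nil, goB]
    · intro start
      simp [PySem.List.enumerate_nil, runB, goB]
  | cons w rest ih =>
    intro s num fis m
    constructor
    · rw [PySem.List.enumerate_cons]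
      cases hb : ((w == 2) && (PySem.List.pyGetD codes s 0 != -1)) with
      | true =>
        have hsB : stepD codes (false, num, fis, m) (s, w)
            = (true, num + 1, 1, m.insert s (0, num + 1, PySem.List.pyGetD codes s 0)) := by
          simp [stepD, hb]
        rw [List.foldl_cons, hsB, goB, dif_pos hb]
        have key := (ih (s + 1) (num + 1) 0
          (m.insert s (0, num + 1, PySem.List.pyGetD codes s 0))).2 s
        rw [show (s + 1) - s = (1 : Int) from by ring] at key
        rw [key]
        simp only [runB, hb, if_pos]
        rw [show s - s = (0 : Int) from by ring]
      | false =>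
        have hsB : stepD codes (false, num, fis, m) (s, w) = (false, num, fis, m) := by
          simp [stepD, hb]
        rw [List.foldl_cons, hsB, goB, dif_neg (by simp [hb])]
        exact (ih (s + 1) num fis m).1
    · intro start
      rw [PySem.List.enumerate_cons]
      cases hb : ((w == 2) && (PySem.List.pyGetD codes s 0 != -1)) with
      | true =>
        have hsB : stepD codes (true, num, s - start, m) (s, w)
            = (true, num, s - start + 1,
               m.insert s (s - start, num, PySem.List.pyGetD codes s 0)) := by
          simp [stepD, hb]
        rw [List.foldl_cons, hsB]
        have key := (ih (s + 1) num 0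
          (m.insert s (s - start, num, PySem.List.pyGetD codes s 0))).2 start
        rw [show (s + 1) - start = s - start + 1 from by ring] at key
        rw [key]
        simp only [runB, hb, if_pos]
      | false =>
        have hsB : stepD codes (true, num, s - start, m) (s, w) = (false, num, s - start, m) := by
          simp [stepD, hb]
        rw [List.foldl_cons, hsB]
        simp only [runB, hb]
        rw [if_neg (by simp), goB, dif_neg (by simp [hb])]
        exact (ih (s + 1) num (s - start) m).1

-- ===== VERDICT (by name: the statement is the Claim_ definition above) =====
theorem select_frames_to_save_spec : Claim_equal_select_frames_to_save := by
  intro is_washing codes _hdom _hpre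
  unfold Spec_select_frames_to_save select_frames_to_save select_frames_to_save_alt
  have hstep : stepA is_washing codes = fun acc i => stepAW codes acc (i, PySem.List.pyGetD is_washing i 0) := by
    funext st i; exact stepA_eq_stepAW is_washing codes st i
  rw [hstep, foldl_idx_eq_enumerate (stepAW codes) 0 is_washing]
  rw [loop_eq codes is_washing 0 (-1) false 0 PySem.Dict.empty PySem.Dict.empty 0 PySem.Dict.empty
    (by simp) (by intro _; refine ⟨rfl, ?_, ?_⟩ <;> simp [PySem.Dict.empty])]
  exact congrArg PySem.Dict.items (stepD_eq_goB codes is_washing 0 0 0 PySem.Dict.empty).1
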